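-- pv_equiv track=rewrite | github.com/kingkw1/pokeagent-speedrun-private | agent/objective_manager.py | get_highest_milestone_index
-- ===== SOURCE A (Python) =====
-- from typing import List, Dict, Any, Optional
--
-- MILESTONE_PROGRESSION = [
--     # [0-2] SPLIT 01: Game start
--     {"milestone": "GAME_RUNNING", "target_location": None, "description": "Game initialized"},
--     {"milestone": "PLAYER_NAME_SET", "target_location": None, "description": "Player named"},
--     {"milestone": "INTRO_CUTSCENE_COMPLETE", "target_location": None, "description": "Intro complete"},
--
--     # [3-7] SPLIT 02: Tutorial sequence
--     {"milestone": "LITTLEROOT_TOWN", "target_location": "LITTLEROOT_TOWN", "description": "Arrive in Littleroot"},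
--     {"milestone": "PLAYER_HOUSE_ENTERED", "target_location": None, "description": "Enter player house"},
--     {"milestone": "PLAYER_BEDROOM", "target_location": None, "description": "Go upstairs to bedroom"},
--     {"milestone": "RIVAL_HOUSE", "target_location": None, "description": "Visit rival's house"},
--     {"milestone": "RIVAL_BEDROOM", "target_location": None, "description": "Go to rival's bedroom"},
--
--     # [8-10] SPLIT 03: Getting starter
--     {"milestone": "ROUTE_101", "target_location": "ROUTE_101", "description": "Find Prof. Birch on Route 101"},
--     {"milestone": "STARTER_CHOSEN", "target_location": None, "description": "Choose starter Pokemon"},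
--     {"milestone": "BIRCH_LAB_VISITED", "target_location": None, "description": "Visit Birch's Lab"},
--
--     # [11-14] SPLIT 03: Rival battle sequence & Return to lab for Pokedex
--     {"milestone": "OLDALE_TOWN", "target_location": "OLDALE_TOWN", "description": "Travel to Oldale Town"},
--     {"milestone": "ROUTE_103", "target_location": "ROUTE_103", "target_coords": (9, 3), "description": "Go to Route 103"},
--     {"milestone": "RIVAL_BATTLE_1", "target_location": "ROUTE_103", "target_coords": (9, 3), "description": "Battle rival May", "special": "rival_battle"},
--     {"milestone": "RECEIVED_POKEDEX", "target_location": "PROFESSOR_BIRCHS_LAB", "description": "Return to Birch for Pokedex"},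
--
--     # [15-18] SPLIT 04: Petalburg City sequence
--     {"milestone": "ROUTE_102", "target_location": "ROUTE_102", "description": "Travel through Route 102"},
--     {"milestone": "PETALBURG_CITY", "target_location": "PETALBURG_CITY", "description": "Arrive at Petalburg City"},
--     {"milestone": "DAD_FIRST_MEETING", "target_location": "PETALBURG_CITY_GYM", "target_coords": (15, 8), "description": "Enter gym to meet Dad", "special": "gym_dialogue"},
--     {"milestone": "GYM_EXPLANATION", "target_location": None, "description": "Watch Wally tutorial", "special": "gym_dialogue"},
--
--     # [19-22] SPLIT 05: Road to Rustboro
--     {"milestone": "ROUTE_104_SOUTH", "target_location": "ROUTE_104_SOUTH", "description": "Travel to Route 104 South"},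
--     {"milestone": "PETALBURG_WOODS", "target_location": "PETALBURG_WOODS", "description": "Navigate Petalburg Woods"},
--     {"milestone": "TEAM_AQUA_GRUNT_DEFEATED", "target_location": None, "description": "Defeat Team Aqua grunt"},
--     {"milestone": "ROUTE_104_NORTH", "target_location": "ROUTE_104_NORTH", "description": "Exit woods to Route 104 North"},
--
--     # [23-26] SPLIT 06: Rustboro Gym
--     {"milestone": "RUSTBORO_CITY", "target_location": "RUSTBORO_CITY", "description": "Arrive at Rustboro City"},
--     {"milestone": "RUSTBORO_GYM_ENTERED", "target_location": "RUSTBORO_CITY_GYM", "target_coords": (27, 19), "description": "Enter Rustboro Gym"},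
--     {"milestone": "ROXANNE_DEFEATED", "target_location": None, "description": "Defeat Roxanne"},
--     {"milestone": "FIRST_GYM_COMPLETE", "target_location": None, "description": "First gym badge obtained"},
-- ]
--
-- def get_highest_milestone_index(milestones: Dict[str, Any]) -> int:
--     """
--     Find the highest completed milestone index.
--     Returns -1 if no milestones completed.
--     """
--     highest_index = -1
--
--     for i, entry in enumerate(MILESTONE_PROGRESSION):
--         milestone_id = entry["milestone"]
--         milestone_data = milestones.get(milestone_id, {})
--         is_complete = milestone_data.get("completed", False) if isinstance(milestone_data, dict) else False
--
--         if is_complete: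
--             highest_index = i
--
--     return highest_index
-- ===== SOURCE B (Python) =====
-- from typing import Dict, Any
--
-- from typing import List, Dict, Any, Optional
--
-- MILESTONE_PROGRESSION = [
--     {"milestone": "GAME_RUNNING", "target_location": None, "description": "Game initialized"},
--     {"milestone": "PLAYER_NAME_SET", "target_location": None, "description": "Player named"},
--     {"milestone": "INTRO_CUTSCENE_COMPLETE", "target_location": None, "description": "Intro complete"},
--     {"milestone": "LITTLEROOT_TOWN", "target_location": "LITTLEROOT_TOWN", "description": "Arrive in Littleroot"},
--     {"milestone": "PLAYER_HOUSE_ENTERED", "target_location": None, "description": "Enter player house"},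
--     {"milestone": "PLAYER_BEDROOM", "target_location": None, "description": "Go upstairs to bedroom"},
--     {"milestone": "RIVAL_HOUSE", "target_location": None, "description": "Visit rival's house"},
--     {"milestone": "RIVAL_BEDROOM", "target_location": None, "description": "Go to rival's bedroom"},
--     {"milestone": "ROUTE_101", "target_location": "ROUTE_101", "description": "Find Prof. Birch on Route 101"},
--     {"milestone": "STARTER_CHOSEN", "target_location": None, "description": "Choose starter Pokemon"},
--     {"milestone": "BIRCH_LAB_VISITED", "target_location": None, "description": "Visit Birch's Lab"},
--     {"milestone": "OLDALE_TOWN", "target_location": "OLDALE_TOWN", "description": "Travel to Oldale Town"},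
--     {"milestone": "ROUTE_103", "target_location": "ROUTE_103", "target_coords": (9, 3), "description": "Go to Route 103"},
--     {"milestone": "RIVAL_BATTLE_1", "target_location": "ROUTE_103", "target_coords": (9, 3), "description": "Battle rival May", "special": "rival_battle"},
--     {"milestone": "RECEIVED_POKEDEX", "target_location": "PROFESSOR_BIRCHS_LAB", "description": "Return to Birch for Pokedex"},
--     {"milestone": "ROUTE_102", "target_location": "ROUTE_102", "description": "Travel through Route 102"},
--     {"milestone": "PETALBURG_CITY", "target_location": "PETALBURG_CITY", "description": "Arrive at Petalburg City"},
--     {"milestone": "DAD_FIRST_MEETING", "target_location": "PETALBURG_CITY_GYM", "target_coords": (15, 8), "description": "Enter gym to meet Dad", "special": "gym_dialogue"},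
--     {"milestone": "GYM_EXPLANATION", "target_location": None, "description": "Watch Wally tutorial", "special": "gym_dialogue"},
--     {"milestone": "ROUTE_104_SOUTH", "target_location": "ROUTE_104_SOUTH", "description": "Travel to Route 104 South"},
--     {"milestone": "PETALBURG_WOODS", "target_location": "PETALBURG_WOODS", "description": "Navigate Petalburg Woods"},
--     {"milestone": "TEAM_AQUA_GRUNT_DEFEATED", "target_location": None, "description": "Defeat Team Aqua grunt"},
--     {"milestone": "ROUTE_104_NORTH", "target_location": "ROUTE_104_NORTH", "description": "Exit woods to Route 104 North"},
--     {"milestone": "RUSTBORO_CITY", "target_location": "RUSTBORO_CITY", "description": "Arrive at Rustboro City"},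
--     {"milestone": "RUSTBORO_GYM_ENTERED", "target_location": "RUSTBORO_CITY_GYM", "target_coords": (27, 19), "description": "Enter Rustboro Gym"},
--     {"milestone": "ROXANNE_DEFEATED", "target_location": None, "description": "Defeat Roxanne"},
--     {"milestone": "FIRST_GYM_COMPLETE", "target_location": None, "description": "First gym badge obtained"},
-- ]
--
-- # index of each milestone id in the progression, built once
-- _MILESTONE_INDEX = {entry["milestone"]: i for i, entry in enumerate(MILESTONE_PROGRESSION)}
--
-- def get_highest_milestone_index(milestones: Dict[str, Any]) -> int:
--     """
--     Find the highest completed milestone index.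
--     Returns -1 if no milestones completed.
--
--     Scans the INPUT dict once instead of the progression list: for each
--     completed entry whose id appears in the progression, keep the max index.
--     """
--     best = -1
--     for milestone_id, data in milestones.items():
--         if isinstance(data, dict) and data.get("completed", False):
--             i = _MILESTONE_INDEX.get(milestone_id)
--             if i is not None and i > best:
--                 best = i
--     return best
-- ===== Notes on version B (the rewrite author's own statement) =====
-- stated objective: alternative
-- what changed: B scans the input milestones dict once, looking each completed id up in a prebuilt id->index map and keeping the running maximum, instead of A's scan over the fixed 27-entry progression list with a lookup into the dict at every entry.
import Mathlib
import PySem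

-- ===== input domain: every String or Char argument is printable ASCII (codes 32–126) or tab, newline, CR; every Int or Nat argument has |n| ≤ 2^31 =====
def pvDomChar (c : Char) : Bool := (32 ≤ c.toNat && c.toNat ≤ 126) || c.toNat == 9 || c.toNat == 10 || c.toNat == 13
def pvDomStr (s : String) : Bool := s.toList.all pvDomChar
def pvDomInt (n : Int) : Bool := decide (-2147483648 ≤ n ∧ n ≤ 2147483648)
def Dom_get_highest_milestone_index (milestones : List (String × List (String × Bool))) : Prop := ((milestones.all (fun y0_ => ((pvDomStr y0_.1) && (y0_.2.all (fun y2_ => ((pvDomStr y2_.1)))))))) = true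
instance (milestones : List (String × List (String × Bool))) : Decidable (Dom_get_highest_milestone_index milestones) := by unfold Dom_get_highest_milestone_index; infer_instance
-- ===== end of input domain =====

-- B scans the input dict once with a prebuilt id->index map, instead of A's scan over the
-- fixed 27-entry progression list with a dict lookup at every entry (objective: alternative).

-- ===== PORT A =====
-- The "milestone" field of each MILESTONE_PROGRESSION entry, in order (the only field A reads).
def pvMilestoneNames : List String :=
  ["GAME_RUNNING", "PLAYER_NAME_SET", "INTRO_CUTSCENE_COMPLETE",
   "LITTLEROOT_TOWN", "PLAYER_HOUSE_ENTERED", "PLAYER_BEDROOM", "RIVAL_HOUSE", "RIVAL_BEDROOM",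
   "ROUTE_101", "STARTER_CHOSEN", "BIRCH_LAB_VISITED",
   "OLDALE_TOWN", "ROUTE_103", "RIVAL_BATTLE_1", "RECEIVED_POKEDEX",
   "ROUTE_102", "PETALBURG_CITY", "DAD_FIRST_MEETING", "GYM_EXPLANATION",
   "ROUTE_104_SOUTH", "PETALBURG_WOODS", "TEAM_AQUA_GRUNT_DEFEATED", "ROUTE_104_NORTH",
   "RUSTBORO_CITY", "RUSTBORO_GYM_ENTERED", "ROXANNE_DEFEATED", "FIRST_GYM_COMPLETE"]

def get_highest_milestone_index (milestones : List (String × List (String × Bool))) : Int :=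
  (PySem.List.enumerate pvMilestoneNames).foldl
    (fun highest_index p =>
      let milestone_data := PySem.Dict.getD (PySem.Dict.mk milestones) p.2 []
      -- isinstance(milestone_data, dict) is always true under this file's typing
      let is_complete := PySem.Dict.getD (PySem.Dict.mk milestone_data) "completed" false
      if is_complete then p.1 else highest_index)
    (-1)

-- ===== PORT B =====
-- _MILESTONE_INDEX = {entry["milestone"]: i for i, entry in enumerate(MILESTONE_PROGRESSION)}
def pvMilestoneIndex : PySem.Dict String Int :=
  PySem.Dict.ofList ((PySem.List.enumerate pvMilestoneNames).map (fun p => (p.2, p.1)))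

def get_highest_milestone_index_alt (milestones : List (String × List (String × Bool))) : Int :=
  milestones.foldl
    (fun best p =>
      if PySem.Dict.getD (PySem.Dict.mk p.2) "completed" false then
        match PySem.Dict.get? pvMilestoneIndex p.1 with
        | some i => if i > best then i else best
        | none => best
      else best)
    (-1)

-- ===== PRECONDITION & SPEC =====
-- Pre_ requires the milestone ids (outer keys) to be pairwise distinct: a Python dict cannot
-- hold a duplicate key, so association lists with a repeated key represent no Python input;
-- on them A's first-match lookup and B's full scan could disagree.
def Pre_get_highest_milestone_index (milestones : List (String × List (String × Bool))) : Prop :=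
  (milestones.map Prod.fst).Nodup

instance (milestones : List (String × List (String × Bool))) : Decidable (Pre_get_highest_milestone_index milestones) := by
  unfold Pre_get_highest_milestone_index; infer_instance

def pvWitness_get_highest_milestone_index : (List (String × List (String × Bool))) :=
  [("GAME_RUNNING", [("completed", true)]), ("ROUTE_101", [("completed", false)])]

def Spec_get_highest_milestone_index (milestones : List (String × List (String × Bool))) (out : Int) : Prop := out = get_highest_milestone_index_alt milestones
instance (milestones : List (String × List (String × Bool))) (out : Int) : Decidable (Spec_get_highest_milestone_index milestones out) := by unfold Spec_get_highest_milestone_index; infer_instance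

-- ===== CLAIM (what is proved, stated in full; the proofs are below) =====
def Claim_equal_get_highest_milestone_index : Prop := ∀ (milestones : List (String × List (String × Bool))), Dom_get_highest_milestone_index milestones → Pre_get_highest_milestone_index milestones → Spec_get_highest_milestone_index milestones (get_highest_milestone_index milestones)

-- ===== LEMMAS AND PROOFS =====

-- the predicate A tests at progression entry `nm`
def pvP (m : List (String × List (String × Bool))) (nm : String) : Bool :=
  PySem.Dict.getD (PySem.Dict.mk (PySem.Dict.getD (PySem.Dict.mk m) nm [])) "completed" false

-- the indices A's loop fires at
def pvPositions (m : List (String × List (String × Bool))) : List Int :=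
  (PySem.List.enumerate pvMilestoneNames).filterMap (fun p => if pvP m p.2 then some p.1 else none)

-- the indices B's loop fires at
def pvCandidates (m : List (String × List (String × Bool))) : List Int :=
  m.filterMap (fun p =>
    if PySem.Dict.getD (PySem.Dict.mk p.2) "completed" false then PySem.Dict.get? pvMilestoneIndex p.1 else none)

lemma pv_foldl_max_eq_or_mem (l : List Int) : ∀ (a : Int), l.foldl max a = a ∨ l.foldl max a ∈ l := by
  induction l with
  | nil => intro a; simp
  | cons x t ih =>
    intro a
    rw [List.foldl_cons]
    rcases ih (max a x) with h | h
    · rcases max_cases a x with ⟨he, _⟩ | ⟨he, _⟩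
      · left; rw [h, he]
      · right; rw [h, he]; exact List.mem_cons_self ..
    · right; exact List.mem_cons_of_mem _ h

lemma pv_foldl_max_ext (l l' : List Int) (a : Int) (h : ∀ x, x ∈ l ↔ x ∈ l') :
    l.foldl max a = l'.foldl max a := by
  apply le_antisymm
  · rcases pv_foldl_max_eq_or_mem l a with he | hm
    · rw [he]; exact (PySem.List.le_foldl_max l' a).1
    · exact (PySem.List.le_foldl_max l' a).2 _ ((h _).mp hm)
  · rcases pv_foldl_max_eq_or_mem l' a with he | hm
    · rw [he]; exact (PySem.List.le_foldl_max l a).1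
    · exact (PySem.List.le_foldl_max l a).2 _ ((h _).mpr hm)

-- A's "remember the last index that fired" equals a running max, because indices ascend.
lemma pv_lastIdx_eq_foldl_max (q : String → Bool) :
    ∀ (l : List (Int × String)) (acc : Int),
      (∀ p ∈ l, acc ≤ p.1) → l.Pairwise (fun a b => a.1 < b.1) →
      l.foldl (fun h p => if q p.2 then p.1 else h) acc
        = (l.filterMap (fun p => if q p.2 then some p.1 else none)).foldl max acc := by
  intro l
  induction l with
  | nil => intro acc _ _; rfl
  | cons x t ih =>
    intro acc hacc hpw
    rw [List.pairwise_cons] at hpw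
    by_cases hq : q x.2
    · have h1 : ∀ p ∈ t, x.1 ≤ p.1 := fun p hp => le_of_lt (hpw.1 p hp)
      have hmax : max acc x.1 = x.1 := max_eq_right (hacc x (by simp))
      simp only [List.foldl_cons, List.filterMap_cons, hq, if_pos, hmax]
      exact ih x.1 h1 hpw.2
    · simp only [List.foldl_cons, List.filterMap_cons, hq, if_neg, Bool.false_eq_true,
        not_false_iff]
      exact ih acc (fun p hp => hacc p (by simp [hp])) hpw.2

-- B's fold is a running max over pvCandidates.
lemma pv_B_eq_foldl_max (m : List (String × List (String × Bool))) :
    ∀ (acc : Int),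
      m.foldl
        (fun best p =>
          if PySem.Dict.getD (PySem.Dict.mk p.2) "completed" false then
            match PySem.Dict.get? pvMilestoneIndex p.1 with
            | some i => if i > best then i else best
            | none => best
          else best) acc
        = (pvCandidates m).foldl max acc := by
  induction m with
  | nil => intro acc; rfl
  | cons x t ih =>
    intro acc
    simp only [List.foldl_cons, pvCandidates, List.filterMap_cons]
    by_cases hc : PySem.Dict.getD (PySem.Dict.mk x.2) "completed" false
    · simp only [hc, if_pos]
      cases hg : PySem.Dict.get? pvMilestoneIndex x.1 with
      | none => simpa [hg] using ih acc
      | some i =>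
        have : (if i > acc then i else acc) = max acc i := by
          rcases lt_or_ge acc i with h | h
          · simp [h, max_eq_right (le_of_lt h)]
          · simp [not_lt.mpr h, max_eq_left h]
        simp only [this, List.foldl_cons]
        exact ih (max acc i)
    · simp only [hc, Bool.false_eq_true, if_neg, not_false_iff]
      exact ih acc

lemma pv_items_index : pvMilestoneIndex.items
    = (PySem.List.enumerate pvMilestoneNames).map (fun p => (p.2, p.1)) := by
  have hnd : ((PySem.List.enumerate pvMilestoneNames).map (fun p => (p.2, p.1))).map Prod.fst
      = pvMilestoneNames := by decide
  have := PySem.Dict.items_foldl_insert_fresh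
      ((PySem.List.enumerate pvMilestoneNames).map (fun p => (p.2, p.1)))
      Prod.fst Prod.snd PySem.Dict.empty
      (by intro a _; rfl)
      (by rw [hnd]; decide)
  simpa using this

lemma pv_mem_index_iff (nm : String) (i : Int) :
    PySem.Dict.get? pvMilestoneIndex nm = some i ↔ (i, nm) ∈ PySem.List.enumerate pvMilestoneNames := by
  have hk : pvMilestoneIndex.keys.Nodup := PySem.Dict.nodup_keys_ofList _
  rw [PySem.Dict.get?_eq_some_iff_mem_items _ _ _ hk, pv_items_index]
  constructor
  · rintro hm
    rcases List.mem_map.mp hm with ⟨p, hp, he⟩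
    obtain ⟨h1, h2⟩ := Prod.mk.injEq .. ▸ he
    have : p = (i, nm) := by cases p; simp_all
    exact this ▸ hp
  · intro hm
    exact List.mem_map.mpr ⟨(i, nm), hm, rfl⟩

-- A fires at progression entry nm iff m holds a completed entry keyed nm (keys distinct).
lemma pv_P_iff (m : List (String × List (String × Bool))) (hnd : (m.map Prod.fst).Nodup) (nm : String) :
    pvP m nm = true ↔ ∃ d, (nm, d) ∈ m ∧ PySem.Dict.getD (PySem.Dict.mk d) "completed" false = true := by
  have hk : (PySem.Dict.mk m).keys.Nodup := by simpa [PySem.Dict.keys_mk] using hnd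
  unfold pvP
  rw [PySem.Dict.getD_eq_get?_getD (PySem.Dict.mk m) nm []]
  cases hg : PySem.Dict.get? (PySem.Dict.mk m) nm with
  | none =>
    constructor
    · intro h; exact absurd h (by decide)
    · rintro ⟨d, hmem, _⟩
      have := (PySem.Dict.get?_eq_some_iff_mem_items (PySem.Dict.mk m) nm d hk).mpr hmem
      rw [hg] at this; cases this
  | some d =>
    simp only [Option.getD_some]
    constructor
    · intro h
      exact ⟨d, (PySem.Dict.get?_eq_some_iff_mem_items (PySem.Dict.mk m) nm d hk).mp hg, h⟩
    · rintro ⟨d', hmem, hc⟩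
      have := (PySem.Dict.get?_eq_some_iff_mem_items (PySem.Dict.mk m) nm d' hk).mpr hmem
      rw [hg] at this
      have hd := Option.some.inj this
      rw [hd]; exact hc

lemma pv_mem_positions_iff_candidates (m : List (String × List (String × Bool)))
    (hnd : (m.map Prod.fst).Nodup) (i : Int) :
    i ∈ pvPositions m ↔ i ∈ pvCandidates m := by
  unfold pvPositions pvCandidates
  simp only [List.mem_filterMap]
  constructor
  · rintro ⟨p, hp, hf⟩
    by_cases hq : pvP m p.2
    · rw [if_pos hq] at hf
      have hi := Option.some.inj hf
      subst hi
      rcases (pv_P_iff m hnd p.2).mp hq with ⟨d, hmem, hc⟩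
      exact ⟨(p.2, d), hmem, by
        simp only [hc, if_pos]
        exact (pv_mem_index_iff p.2 p.1).mpr (by simpa using hp)⟩
    · rw [if_neg hq] at hf; exact absurd hf (by simp)
  · rintro ⟨p, hp, hf⟩
    by_cases hc : PySem.Dict.getD (PySem.Dict.mk p.2) "completed" false
    · rw [if_pos hc] at hf
      have henum : (i, p.1) ∈ PySem.List.enumerate pvMilestoneNames :=
        (pv_mem_index_iff p.1 i).mp hf
      refine ⟨(i, p.1), henum, ?_⟩
      have hq : pvP m p.1 = true := (pv_P_iff m hnd p.1).mpr ⟨p.2, by simpa using hp, hc⟩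
      simp [hq]
    · rw [if_neg hc] at hf; exact absurd hf (by simp)

-- ===== VERDICT (by name: the statement is the Claim_ definition above) =====
theorem get_highest_milestone_index_spec : Claim_equal_get_highest_milestone_index := by
  intro m _ hpre
  show get_highest_milestone_index m = get_highest_milestone_index_alt m
  have hA : get_highest_milestone_index m = (pvPositions m).foldl max (-1) := by
    have := pv_lastIdx_eq_foldl_max (fun nm => pvP m nm)
      (PySem.List.enumerate pvMilestoneNames) (-1)
      (by
        intro p hp
        rcases (PySem.List.mem_enumerate_iff _ _ _).mp hp with ⟨k, hk, he⟩
        subst he; omega)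
      (PySem.List.pairwise_lt_enumerate _ _)
    exact this
  have hB : get_highest_milestone_index_alt m = (pvCandidates m).foldl max (-1) :=
    pv_B_eq_foldl_max m (-1)
  rw [hA, hB]
  exact pv_foldl_max_ext _ _ _ (pv_mem_positions_iff_candidates m hpre)
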